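-- pv_equiv track=rewrite | github.com/hedtorresca/SIREDANE | FastAPI/utils/utils_oracle.py | _construir_nombre_completo
-- ===== SOURCE A (Python) =====
-- from typing import Any, Dict, List, Optional
--
-- def _normalizar_cadena(valor: Optional[str]) -> str:
--     if valor is None:
--         return ""
--     return " ".join(str(valor).strip().upper().split())
--
-- def _construir_nombre_completo(
--     primer_nombre: Optional[str],
--     segundo_nombre: Optional[str],
--     primer_apellido: Optional[str],
--     segundo_apellido: Optional[str],
-- ) -> str:
--     partes = [
--         _normalizar_cadena(primer_nombre),
--         _normalizar_cadena(segundo_nombre),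
--         _normalizar_cadena(primer_apellido),
--         _normalizar_cadena(segundo_apellido),
--     ]
--     return " ".join([parte for parte in partes if parte])
-- ===== SOURCE B (Python) =====
-- from typing import Optional
--
--
-- def _construir_nombre_completo(
--     primer_nombre: Optional[str],
--     segundo_nombre: Optional[str],
--     primer_apellido: Optional[str],
--     segundo_apellido: Optional[str],
-- ) -> str:
--     combinado = " ".join(
--         "" if parte is None else str(parte)
--         for parte in (primer_nombre, segundo_nombre, primer_apellido, segundo_apellido)
--     )
--     return " ".join(combinado.upper().split())
-- ===== Notes on version B (the rewrite author's own statement) =====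
-- stated objective: simpler
-- what changed: Instead of normalizing each of the four parts separately, filtering out empties and joining, B concatenates the raw parts (None mapped to "") into one string and normalizes it once with a single upper().split()/join pass.
import Mathlib
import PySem

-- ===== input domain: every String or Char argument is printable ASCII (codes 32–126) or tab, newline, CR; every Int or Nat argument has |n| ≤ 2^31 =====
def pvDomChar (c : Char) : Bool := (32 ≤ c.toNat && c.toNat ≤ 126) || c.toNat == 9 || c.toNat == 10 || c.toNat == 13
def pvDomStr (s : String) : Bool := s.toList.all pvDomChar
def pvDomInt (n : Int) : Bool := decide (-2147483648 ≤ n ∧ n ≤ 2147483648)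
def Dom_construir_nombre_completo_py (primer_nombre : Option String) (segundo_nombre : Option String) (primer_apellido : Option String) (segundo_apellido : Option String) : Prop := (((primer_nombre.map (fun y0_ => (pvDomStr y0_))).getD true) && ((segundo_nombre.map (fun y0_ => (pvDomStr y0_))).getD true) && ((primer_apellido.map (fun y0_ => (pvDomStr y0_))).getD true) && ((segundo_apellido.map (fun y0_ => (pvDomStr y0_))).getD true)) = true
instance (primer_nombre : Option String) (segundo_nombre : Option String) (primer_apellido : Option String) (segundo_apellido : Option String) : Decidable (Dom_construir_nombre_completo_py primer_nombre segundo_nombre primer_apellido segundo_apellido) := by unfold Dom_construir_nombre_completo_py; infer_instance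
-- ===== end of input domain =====

-- B builds the full name by joining the four raw parts (None → "") into one string and
-- normalizing it once with a single upper/split/join pass, instead of A's four per-part
-- normalizations plus an empty-filtering join (objective: simpler, same cost).

-- ===== PORT A =====
-- _normalizar_cadena(valor)
def pvNormalizarCadena (valor : Option String) : String :=
  match valor with
  | none => ""
  | some v => PySem.Str.join " " (PySem.Str.split₀ (PySem.Str.upper (PySem.Str.strip v)))

def construir_nombre_completo_py (primer_nombre : Option String) (segundo_nombre : Option String) (primer_apellido : Option String) (segundo_apellido : Option String) : String :=
  let partes := [pvNormalizarCadena primer_nombre, pvNormalizarCadena segundo_nombre,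
                 pvNormalizarCadena primer_apellido, pvNormalizarCadena segundo_apellido]
  PySem.Str.join " " (partes.filter (fun parte => !(parte == "")))

-- ===== PORT B =====
def construir_nombre_completo_py_alt (primer_nombre : Option String) (segundo_nombre : Option String) (primer_apellido : Option String) (segundo_apellido : Option String) : String :=
  let combinado := PySem.Str.join " "
    [primer_nombre.getD "", segundo_nombre.getD "", primer_apellido.getD "", segundo_apellido.getD ""]
  PySem.Str.join " " (PySem.Str.split₀ (PySem.Str.upper combinado))

-- ===== PRECONDITION & SPEC =====
def Spec_construir_nombre_completo_py (primer_nombre : Option String) (segundo_nombre : Option String) (primer_apellido : Option String) (segundo_apellido : Option String) (out : String) : Prop := out = construir_nombre_completo_py_alt primer_nombre segundo_nombre primer_apellido segundo_apellido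
instance (primer_nombre : Option String) (segundo_nombre : Option String) (primer_apellido : Option String) (segundo_apellido : Option String) (out : String) : Decidable (Spec_construir_nombre_completo_py primer_nombre segundo_nombre primer_apellido segundo_apellido out) := by unfold Spec_construir_nombre_completo_py; infer_instance

-- ===== CLAIM (what is proved, stated in full; the proofs are below) =====
def Claim_equal_construir_nombre_completo_py : Prop := ∀ (primer_nombre : Option String) (segundo_nombre : Option String) (primer_apellido : Option String) (segundo_apellido : Option String), Dom_construir_nombre_completo_py primer_nombre segundo_nombre primer_apellido segundo_apellido → Spec_construir_nombre_completo_py primer_nombre segundo_nombre primer_apellido segundo_apellido (construir_nombre_completo_py primer_nombre segundo_nombre primer_apellido segundo_apellido)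

-- ===== LEMMAS AND PROOFS =====

-- A clean structural recursion computing split₀'s words (proof-side only):
-- cur is the current (reversed) word being collected.
def pvW : List Char → List Char → List (List Char)
  | [], cur => if cur.isEmpty then [] else [cur.reverse]
  | c :: rest, cur =>
    if PySem.Chars.isspace c then
      if cur.isEmpty then pvW rest [] else cur.reverse :: pvW rest []
    else pvW rest (c :: cur)

theorem pvGo_eq (s : List Char) : ∀ cur acc,
    PySem.Chars.split₀.go s cur acc = acc.reverse ++ pvW s cur := by
  induction s with
  | nil =>
    intro cur acc
    rw [PySem.Chars.split₀.go, pvW]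
    by_cases h : cur.isEmpty <;> simp [h]
  | cons c rest ih =>
    intro cur acc
    rw [PySem.Chars.split₀.go, pvW]
    by_cases hs : PySem.Chars.isspace c
    · by_cases hc : cur.isEmpty <;> simp [hs, hc, ih]
    · simp [hs, ih]

theorem pvSplit₀_eq (s : List Char) : PySem.Chars.split₀ s = pvW s [] := by
  simpa using pvGo_eq s [] []

-- splitting at an explicit space concatenates the word lists
theorem pvW_space_append (xs : List Char) : ∀ cur (ys : List Char),
    pvW (xs ++ ' ' :: ys) cur = pvW xs cur ++ pvW ys [] := by
  induction xs with
  | nil =>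
    intro cur ys
    rw [List.nil_append, pvW, pvW]
    have hs : PySem.Chars.isspace ' ' = true := by decide
    by_cases hc : cur.isEmpty <;> simp [hs, hc]
  | cons c rest ih =>
    intro cur ys
    rw [List.cons_append, pvW, pvW]
    by_cases hs : PySem.Chars.isspace c
    · by_cases hc : cur.isEmpty <;> simp [hs, hc, ih]
    · simp [hs, ih]

theorem pvW_allspace (t : List Char) (ht : ∀ c ∈ t, PySem.Chars.isspace c = true) :
    ∀ cur, pvW t cur = pvW [] cur := by
  induction t with
  | nil => intro cur; rfl
  | cons c rest ih =>
    intro cur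
    have hs : PySem.Chars.isspace c = true := ht c (List.mem_cons_self)
    have ih' := ih (fun d hd => ht d (List.mem_cons_of_mem c hd))
    rw [pvW, pvW]
    have hz : pvW [] [] = ([] : List (List Char)) := by rw [pvW]; rfl
    by_cases hc : cur.isEmpty <;> simp [hs, hc, ih' [], hz]

theorem pvW_append_allspace (t : List Char) (ht : ∀ c ∈ t, PySem.Chars.isspace c = true)
    (s : List Char) : ∀ cur, pvW (s ++ t) cur = pvW s cur := by
  induction s with
  | nil => intro cur; simpa using pvW_allspace t ht cur
  | cons c rest ih =>
    intro cur
    rw [List.cons_append, pvW, pvW]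
    by_cases hs : PySem.Chars.isspace c
    · by_cases hc : cur.isEmpty <;> simp [hs, hc, ih]
    · simp [hs, ih]

theorem pvSplit₀_rstrip (s : List Char) :
    PySem.Chars.split₀ (PySem.Chars.rstrip s) = PySem.Chars.split₀ s := by
  have hdecomp : PySem.Chars.rstrip s ++ (List.takeWhile PySem.Chars.isspace s.reverse).reverse = s := by
    rw [PySem.Chars.rstrip, ← List.reverse_append, List.takeWhile_append_dropWhile,
        List.reverse_reverse]
  have ht : ∀ c ∈ (List.takeWhile PySem.Chars.isspace s.reverse).reverse, PySem.Chars.isspace c = true := by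
    intro c hc
    exact List.mem_takeWhile_imp (List.mem_reverse.mp hc)
  rw [pvSplit₀_eq, pvSplit₀_eq]
  conv_rhs => rw [← hdecomp]
  rw [pvW_append_allspace _ ht]

theorem pvW_lstrip (s : List Char) : pvW (PySem.Chars.lstrip s) [] = pvW s [] := by
  induction s with
  | nil => rfl
  | cons c rest ih =>
    by_cases hs : PySem.Chars.isspace c
    · rw [PySem.Chars.lstrip, List.dropWhile_cons_of_pos hs]
      rw [show pvW (c :: rest) [] = pvW rest [] by rw [pvW]; simp [hs]]
      exact ih
    · rw [PySem.Chars.lstrip, List.dropWhile_cons_of_neg (by simpa using hs)]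

theorem pvSplit₀_strip (s : List Char) :
    PySem.Chars.split₀ (PySem.Chars.strip s) = PySem.Chars.split₀ s := by
  rw [PySem.Chars.strip, pvSplit₀_rstrip, pvSplit₀_eq, pvW_lstrip, ← pvSplit₀_eq]

theorem pvIsspace_upperChar (c : Char) :
    PySem.Chars.isspace (PySem.Chars.upperChar c) = PySem.Chars.isspace c := by
  by_cases h : PySem.Chars.islower c
  · have hb : c.toNat ≥ 97 ∧ c.toNat ≤ 122 := by simpa [PySem.Chars.islower] using h
    obtain ⟨h1, h2⟩ := hb
    have hv : (Char.ofNat (c.toNat - 32)).toNat = c.toNat - 32 := by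
      rw [Char.toNat_ofNat, if_pos]; left; omega
    have e1 : PySem.Chars.isspace c = false := by
      simp only [PySem.Chars.isspace]
      simp only [Bool.or_eq_false_iff, Bool.and_eq_false_iff, decide_eq_false_iff_not]
      omega
    have e2 : PySem.Chars.isspace (Char.ofNat (c.toNat - 32)) = false := by
      simp only [PySem.Chars.isspace, hv]
      simp only [Bool.or_eq_false_iff, Bool.and_eq_false_iff, decide_eq_false_iff_not]
      omega
    simp [PySem.Chars.upperChar, h, e1, e2]
  · simp [PySem.Chars.upperChar, h]

theorem pvUpper_strip_comm (s : List Char) :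
    PySem.Chars.upper (PySem.Chars.strip s) = PySem.Chars.strip (PySem.Chars.upper s) := by
  have hf : (PySem.Chars.isspace ∘ PySem.Chars.upperChar) = PySem.Chars.isspace := by
    funext c; exact pvIsspace_upperChar c
  have hl : ∀ t : List Char, PySem.Chars.lstrip (PySem.Chars.upper t) = PySem.Chars.upper (PySem.Chars.lstrip t) := by
    intro t
    simp only [PySem.Chars.lstrip, PySem.Chars.upper, List.dropWhile_map, hf]
  have hr : ∀ t : List Char, PySem.Chars.rstrip (PySem.Chars.upper t) = PySem.Chars.upper (PySem.Chars.rstrip t) := by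
    intro t
    simp only [PySem.Chars.rstrip, PySem.Chars.upper, ← List.map_reverse, List.dropWhile_map, hf]
  rw [PySem.Chars.strip, PySem.Chars.strip, hl s, hr (PySem.Chars.lstrip s)]

theorem pvSplit₀_upper_strip (s : List Char) :
    PySem.Chars.split₀ (PySem.Chars.upper (PySem.Chars.strip s)) = PySem.Chars.split₀ (PySem.Chars.upper s) := by
  rw [pvUpper_strip_comm, pvSplit₀_strip]

-- every word produced by split₀ is nonempty
theorem pvW_ne_nil (s : List Char) : ∀ cur, ∀ w ∈ pvW s cur, w ≠ [] := by
  induction s with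
  | nil =>
    intro cur w hw
    rw [pvW] at hw
    by_cases hc : cur.isEmpty
    · simp [hc] at hw
    · simp [hc] at hw
      subst hw
      simpa [List.isEmpty_iff] using hc
  | cons c rest ih =>
    intro cur w hw
    rw [pvW] at hw
    by_cases hs : PySem.Chars.isspace c
    · by_cases hc : cur.isEmpty
      · simp [hs, hc] at hw; exact ih [] w hw
      · simp [hs, hc] at hw
        rcases hw with hw | hw
        · subst hw; simpa [List.isEmpty_iff] using hc
        · exact ih [] w hw
    · simp [hs] at hw; exact ih _ w hw

theorem pvSplit₀_words_ne_nil (s : List Char) : ∀ w ∈ PySem.Chars.split₀ s, w ≠ [] := by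
  rw [pvSplit₀_eq]; exact pvW_ne_nil s []

theorem pvJoin_cons_ne (sep w : List Char) (ws : List (List Char)) (h : ws ≠ []) :
    PySem.Chars.join sep (w :: ws) = w ++ sep ++ PySem.Chars.join sep ws := by
  cases ws with
  | nil => exact absurd rfl h
  | cons y zs => exact PySem.Chars.join_cons_cons sep w y zs

theorem pvJoin_ne_nil (sep : List Char) (ws : List (List Char))
    (hw : ∀ w ∈ ws, w ≠ []) (h : ws ≠ []) : PySem.Chars.join sep ws ≠ [] := by
  cases ws with
  | nil => exact absurd rfl h
  | cons w zs =>
    cases zs with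
    | nil =>
      rw [PySem.Chars.join_singleton]
      exact hw w List.mem_cons_self
    | cons y zs' =>
      rw [PySem.Chars.join_cons_cons]
      have : w ≠ [] := hw w List.mem_cons_self
      simp [this]

theorem pvJoin_append (sep : List Char) (ws1 : List (List Char)) : ∀ ws2, ws1 ≠ [] → ws2 ≠ [] →
    PySem.Chars.join sep (ws1 ++ ws2) = PySem.Chars.join sep ws1 ++ sep ++ PySem.Chars.join sep ws2 := by
  induction ws1 with
  | nil => intro ws2 h1 _; exact absurd rfl h1
  | cons w ws1' ih =>
    intro ws2 _ h2
    cases ws1' with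
    | nil =>
      rw [List.singleton_append, pvJoin_cons_ne sep w ws2 h2, PySem.Chars.join_singleton]
    | cons y zs =>
      rw [List.cons_append, pvJoin_cons_ne sep w _ (by simp), PySem.Chars.join_cons_cons,
          ih ws2 (by simp) h2]
      simp [List.append_assoc]

-- joining the per-part joins equals joining the flattened word list
theorem pvJoin_map_join (sep : List Char) (ls : List (List (List Char)))
    (hne : ∀ ws ∈ ls, ws ≠ []) (hw : ∀ ws ∈ ls, ∀ w ∈ ws, w ≠ []) :
    PySem.Chars.join sep (ls.map (PySem.Chars.join sep)) = PySem.Chars.join sep ls.flatten := by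
  induction ls with
  | nil => rfl
  | cons ws ls' ih =>
    cases ls' with
    | nil => simp [PySem.Chars.join_singleton]
    | cons ws' rest =>
      have hne' : ∀ x ∈ ws' :: rest, x ≠ [] := fun x hx => hne x (List.mem_cons_of_mem ws hx)
      have hw' : ∀ x ∈ ws' :: rest, ∀ w ∈ x, w ≠ [] := fun x hx => hw x (List.mem_cons_of_mem ws hx)
      have hflat : (ws' :: rest).flatten ≠ [] := by
        have : ws' ≠ [] := hne' ws' List.mem_cons_self
        cases ws' with
        | nil => exact absurd rfl this
        | cons a b => simp
      have h2 := pvJoin_append sep ws ((ws' :: rest).flatten) (hne ws List.mem_cons_self) hflat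
      simp only [List.flatten_cons] at h2 ⊢
      rw [List.map_cons, pvJoin_cons_ne sep _ _ (by simp), ih hne' hw']
      exact h2.symm

-- dropping empty word lists changes neither the flattening …
theorem pvFlatten_filter (ls : List (List (List Char))) :
    (ls.filter (fun ws => !ws.isEmpty)).flatten = ls.flatten := by
  induction ls with
  | nil => rfl
  | cons ws ls' ih =>
    by_cases h : ws.isEmpty
    · have : ws = [] := List.isEmpty_iff.mp h
      simp [this, ih]
    · simp [h, ih]

-- A's per-part normalization, written through the getD "" view B uses
theorem pvNormalizar_eq (o : Option String) :
    pvNormalizarCadena o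
      = PySem.Str.join " " (PySem.Str.split₀ (PySem.Str.upper (PySem.Str.strip (o.getD "")))) := by
  cases o with
  | none => rfl
  | some v => rfl

theorem pvStrEq_toList (p : String) : (p == "") = (p.toList.isEmpty) := by
  by_cases h : p = ""
  · subst h; rfl
  · have h2 : p.toList ≠ [] := by
      intro hc
      exact h (by simpa using congrArg String.ofList hc)
    rw [show (p == "") = false from beq_eq_false_iff_ne.mpr h,
        show p.toList.isEmpty = false from by simpa [List.isEmpty_iff] using h2]

-- the Chars-level value of one normalized part
theorem pvPart_toList (o : Option String) :
    (pvNormalizarCadena o).toList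
      = PySem.Chars.join " ".toList (PySem.Chars.split₀ (PySem.Chars.upper (o.getD "").toList)) := by
  rw [pvNormalizar_eq, PySem.Str.toList_join]
  rw [show (PySem.Str.split₀ (PySem.Str.upper (PySem.Str.strip (o.getD "")))).map String.toList
        = PySem.Chars.split₀ (PySem.Str.upper (PySem.Str.strip (o.getD ""))).toList from
      PySem.Str.split₀_map_toList _]
  rw [PySem.Str.toList_upper, PySem.Str.toList_strip, pvSplit₀_upper_strip]

theorem pvMain (l1 l2 l3 l4 : List Char) :
    PySem.Chars.join " ".toList
      (List.filter (fun l => !l.isEmpty)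
        ([l1, l2, l3, l4].map (fun l =>
          PySem.Chars.join " ".toList (PySem.Chars.split₀ (PySem.Chars.upper l)))))
    = PySem.Chars.join " ".toList
        (PySem.Chars.split₀ (PySem.Chars.upper
          (PySem.Chars.join " ".toList [l1, l2, l3, l4]))) := by
  set sep := " ".toList with hsep
  have hsep' : sep = [' '] := by decide
  -- left side: filter before the outer map, then flatten
  have hmap : ([l1, l2, l3, l4].map (fun l =>
      PySem.Chars.join sep (PySem.Chars.split₀ (PySem.Chars.upper l))))
      = (([l1, l2, l3, l4].map (fun l => PySem.Chars.split₀ (PySem.Chars.upper l))).map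
          (PySem.Chars.join sep)) := by
    simp
  set ls := [l1, l2, l3, l4].map (fun l => PySem.Chars.split₀ (PySem.Chars.upper l)) with hls
  have hwords : ∀ ws ∈ ls, ∀ w ∈ ws, w ≠ [] := by
    intro ws hws w hw
    rw [hls] at hws
    simp only [List.mem_map] at hws
    obtain ⟨l, _, rfl⟩ := hws
    exact pvSplit₀_words_ne_nil _ w hw
  have hfilter : List.filter (fun l => !l.isEmpty) (ls.map (PySem.Chars.join sep))
      = (ls.filter (fun ws => !ws.isEmpty)).map (PySem.Chars.join sep) := by
    rw [List.filter_map]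
    congr 1
    apply List.filter_congr
    intro ws hws
    simp only [Function.comp]
    by_cases h : ws.isEmpty
    · have : ws = [] := List.isEmpty_iff.mp h
      simp [this, PySem.Chars.join_nil]
    · have hne : PySem.Chars.join sep ws ≠ [] :=
        pvJoin_ne_nil sep ws (hwords ws hws) (by simpa [List.isEmpty_iff] using h)
      simp [h, hne]
  rw [hmap, hfilter,
      pvJoin_map_join sep _
        (by intro ws hws; exact fun hc => by
              have := List.of_mem_filter hws
              rw [hc] at this; simp at this)
        (fun ws hws => hwords ws (List.mem_of_mem_filter hws)),
      pvFlatten_filter]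
  -- right side: distribute upper, split at the three spaces
  have hcomb : PySem.Chars.join sep [l1, l2, l3, l4]
      = l1 ++ ' ' :: (l2 ++ ' ' :: (l3 ++ ' ' :: l4)) := by
    rw [hsep']
    simp [PySem.Chars.join, List.intercalate, List.intersperse]
  have hupc : PySem.Chars.upperChar ' ' = ' ' := by decide
  have hupper : PySem.Chars.upper (l1 ++ ' ' :: (l2 ++ ' ' :: (l3 ++ ' ' :: l4)))
      = PySem.Chars.upper l1 ++ ' ' :: (PySem.Chars.upper l2 ++ ' ' :: (PySem.Chars.upper l3 ++ ' ' :: PySem.Chars.upper l4)) := by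
    simp [PySem.Chars.upper, hupc]
  have hsplit : PySem.Chars.split₀ (PySem.Chars.upper l1 ++ ' ' :: (PySem.Chars.upper l2 ++ ' ' :: (PySem.Chars.upper l3 ++ ' ' :: PySem.Chars.upper l4)))
      = PySem.Chars.split₀ (PySem.Chars.upper l1) ++ (PySem.Chars.split₀ (PySem.Chars.upper l2) ++ (PySem.Chars.split₀ (PySem.Chars.upper l3) ++ PySem.Chars.split₀ (PySem.Chars.upper l4))) := by
    simp only [pvSplit₀_eq]
    rw [pvW_space_append, pvW_space_append, pvW_space_append]
  rw [hcomb, hupper, hsplit, hls]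
  simp [List.flatten]

-- ===== VERDICT (by name: the statement is the Claim_ definition above) =====
theorem construir_nombre_completo_py_spec : Claim_equal_construir_nombre_completo_py := by
  intro pn sn pa sa _
  unfold Spec_construir_nombre_completo_py
  unfold construir_nombre_completo_py construir_nombre_completo_py_alt
  simp only []
  rw [PySem.Str.join, PySem.Str.join]
  apply congrArg String.ofList
  rw [show (PySem.Str.split₀ (PySem.Str.upper (PySem.Str.join " "
        [pn.getD "", sn.getD "", pa.getD "", sa.getD ""]))).map String.toList
      = PySem.Chars.split₀ (PySem.Str.upper (PySem.Str.join " "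
        [pn.getD "", sn.getD "", pa.getD "", sa.getD ""])).toList from PySem.Str.split₀_map_toList _,
     PySem.Str.toList_upper, PySem.Str.toList_join]
  have e1 : List.map String.toList
      (List.filter (fun parte => !(parte == ""))
        [pvNormalizarCadena pn, pvNormalizarCadena sn, pvNormalizarCadena pa, pvNormalizarCadena sa])
      = List.filter (fun l => !l.isEmpty)
          (List.map String.toList
            [pvNormalizarCadena pn, pvNormalizarCadena sn, pvNormalizarCadena pa, pvNormalizarCadena sa]) := by
    rw [List.filter_map]
    congr 1
    apply List.filter_congr
    intro p _
    simp only [Function.comp]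
    rw [pvStrEq_toList]
  rw [e1]
  simp only [List.map_cons, List.map_nil, pvPart_toList]
  have hlit : [PySem.Chars.join " ".toList (PySem.Chars.split₀ (PySem.Chars.upper (pn.getD "").toList)),
               PySem.Chars.join " ".toList (PySem.Chars.split₀ (PySem.Chars.upper (sn.getD "").toList)),
               PySem.Chars.join " ".toList (PySem.Chars.split₀ (PySem.Chars.upper (pa.getD "").toList)),
               PySem.Chars.join " ".toList (PySem.Chars.split₀ (PySem.Chars.upper (sa.getD "").toList))]
      = [(pn.getD "").toList, (sn.getD "").toList, (pa.getD "").toList, (sa.getD "").toList].map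
          (fun l => PySem.Chars.join " ".toList (PySem.Chars.split₀ (PySem.Chars.upper l))) := by
    simp only [List.map_cons, List.map_nil]
  rw [hlit]
  exact pvMain _ _ _ _
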